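-- pv_equiv track=rewrite | github.com/miliar/Code_Jam_Webscraper | solutions_python/Problem_181/1612.py | find
-- ===== SOURCE A (Python) =====
-- def find(cur, rest):
--     if cur is None:
--         if len(rest) < 2:
--             return rest
--
--         return find(sorted(list(rest[:2]), reverse=True), rest[2:])
--
--     if not rest:
--         return "".join(cur)
--
--     head = rest[0]
--
--     if head >= cur[0]:
--         return find([head] + cur, rest[1:])
--     else:
--         return find(cur + [head], rest[1:])
-- ===== SOURCE B (Python) =====
-- def find(cur, rest):
--     if cur is None:
--         if len(rest) < 2:
--             return rest
--         cur = sorted(rest[:2], reverse=True)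
--         rest = rest[2:]
--     acc = list(cur)
--     for head in rest:
--         if head >= acc[0]:
--             acc.insert(0, head)
--         else:
--             acc.append(head)
--     return "".join(acc)
-- ===== Notes on version B (the rewrite author's own statement) =====
-- stated objective: faster
-- what changed: Replaces A's per-character tail recursion (a new call frame and a freshly copied list [head]+cur or cur+[head] for every character, hitting the recursion limit on long inputs) with one explicit for loop mutating a single accumulator list in place; the None case becomes a fall-through re-assignment instead of a recursive restart.
import Mathlib
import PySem

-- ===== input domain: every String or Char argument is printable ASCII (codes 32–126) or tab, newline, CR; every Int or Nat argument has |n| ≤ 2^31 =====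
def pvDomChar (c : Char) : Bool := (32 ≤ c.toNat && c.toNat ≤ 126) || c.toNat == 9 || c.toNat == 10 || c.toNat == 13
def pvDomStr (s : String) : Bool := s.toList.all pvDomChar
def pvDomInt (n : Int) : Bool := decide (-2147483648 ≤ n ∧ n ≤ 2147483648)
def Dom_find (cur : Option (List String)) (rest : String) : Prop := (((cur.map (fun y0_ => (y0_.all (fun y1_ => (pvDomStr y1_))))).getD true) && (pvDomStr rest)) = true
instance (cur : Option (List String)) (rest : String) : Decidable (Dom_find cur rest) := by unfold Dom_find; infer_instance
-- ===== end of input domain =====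

-- B replaces A's per-character tail recursion with one explicit loop over the
-- characters mutating a single accumulator list (same prepend/append rule);
-- return values agree on all of Pre_.

-- ===== PORT A =====
-- the non-None recursion of A: cur[0] is pyGetD cur 0 "" (in range on Pre_'s inputs)
def findGo (cur : List String) (rest : List Char) : String :=
  match rest with
  | [] => PySem.Str.join "" cur
  | h :: t =>
    let head := String.mk [h]
    if PySem.List.pyGetD cur 0 "" ≤ head then findGo (head :: cur) t
    else findGo (cur ++ [head]) t

def find (cur : Option (List String)) (rest : String) : String :=
  match cur with
  | none =>
    if PySem.Str.len rest < 2 then rest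
    else
      findGo (PySem.List.sorted ((PySem.List.slice rest.toList none (some 2)).map
                (fun ch => String.mk [ch])) (fun x => x) true)
             (PySem.List.slice rest.toList (some 2) none)
  | some c => findGo c rest.toList

-- ===== PORT B =====
-- the loop body of B: prepend when head >= acc[0], else append
def findStep (acc : List String) (h : Char) : List String :=
  if PySem.List.pyGetD acc 0 "" ≤ String.mk [h] then String.mk [h] :: acc
  else acc ++ [String.mk [h]]

def find_alt (cur : Option (List String)) (rest : String) : String :=
  match cur with
  | none =>
    if PySem.Str.len rest < 2 then rest
    else
      PySem.Str.join ""
        ((PySem.List.slice rest.toList (some 2) none).foldl findStep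
          (PySem.List.sorted ((PySem.List.slice rest.toList none (some 2)).map
            (fun ch => String.mk [ch])) (fun x => x) true))
  | some c => PySem.Str.join "" (rest.toList.foldl findStep c)

-- ===== PRECONDITION & SPEC =====
-- Pre_ excludes cur = some [] with nonempty rest, on which both Pythons raise IndexError (cur[0]).
def Pre_find (cur : Option (List String)) (rest : String) : Prop :=
  cur = some [] → rest = ""
instance (cur : Option (List String)) (rest : String) : Decidable (Pre_find cur rest) := by
  unfold Pre_find; infer_instance

def pvWitness_find : Option (List String) × String := (some ["b"], "ac")

def Spec_find (cur : Option (List String)) (rest : String) (out : String) : Prop := out = find_alt cur rest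
instance (cur : Option (List String)) (rest : String) (out : String) : Decidable (Spec_find cur rest out) := by unfold Spec_find; infer_instance

-- ===== CLAIM (what is proved, stated in full; the proofs are below) =====
def Claim_equal_find : Prop := ∀ (cur : Option (List String)) (rest : String), Dom_find cur rest → Pre_find cur rest → Spec_find cur rest (find cur rest)

-- ===== LEMMAS AND PROOFS =====
-- A's recursion computes the join of B's fold, for every accumulator
lemma findGo_eq_foldl (rest : List Char) : ∀ cur : List String,
    findGo cur rest = PySem.Str.join "" (rest.foldl findStep cur) := by
  induction rest with
  | nil => intro cur; rfl
  | cons h t ih =>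
    intro cur
    simp only [findGo, List.foldl, findStep]
    split_ifs with hc
    · exact ih _
    · exact ih _

-- ===== VERDICT (by name: the statement is the Claim_ definition above) =====
theorem find_spec : Claim_equal_find := by
  intro cur rest _ _
  unfold Spec_find find find_alt
  cases cur with
  | none =>
    split_ifs with h
    · rfl
    · exact findGo_eq_foldl _ _
  | some c => exact findGo_eq_foldl _ _
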